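-- pv_equiv track=rewrite | github.com/aaa2ppp/ya-algo-training8-pub | less4/a/main.py | solve
-- ===== SOURCE A (Python) =====
-- def solve(front, back):
--     Arrival, Departure = 0, 1  # Порядок важен! для сортировки
--
--     A, B = 0, 1  # points
--     points = [0, 0]
--
--     events = []
--
--     for dep, arr in front:
--         events.append((dep, Departure, A))
--         events.append((arr, Arrival, B))
--
--     for dep, arr in back:
--         events.append((dep, Departure, B))
--         events.append((arr, Arrival, A))
--
--     events.sort()
--
--     count = 0
--     for _, etype, point in events:
--         if etype == Arrival:
--             points[point] += 1
--         else:  # Departure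
--             if points[point] > 0:
--                 points[point] -= 1
--             else:
--                 count += 1
--
--     return count
-- ===== SOURCE B (Python) =====
-- def _unmatched(deps, arrs):
--     # departures push the needed-bus deficit up, arrivals push it down;
--     # the answer for one point is the maximum prefix deficit (never below 0)
--     events = sorted([(t, 1) for t in deps] + [(t, 0) for t in arrs])
--     s = best = 0
--     for _, tag in events:
--         s += 1 if tag == 1 else -1
--         if s > best:
--             best = s
--     return best
--
--
-- def solve(front, back):
--     return (_unmatched([d for d, _ in front], [a for _, a in back])
--             + _unmatched([d for d, _ in back], [a for _, a in front]))
-- ===== Notes on version B (the rewrite author's own statement) =====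
-- stated objective: alternative
-- what changed: A does one fused sweep over all four event streams merged and sorted, keeping a clamped available-bus pool per point; B handles each point independently, sorting that point's departure/arrival events and computing the maximum prefix deficit (departures minus arrivals), summing the two points' maxima.
import Mathlib
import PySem

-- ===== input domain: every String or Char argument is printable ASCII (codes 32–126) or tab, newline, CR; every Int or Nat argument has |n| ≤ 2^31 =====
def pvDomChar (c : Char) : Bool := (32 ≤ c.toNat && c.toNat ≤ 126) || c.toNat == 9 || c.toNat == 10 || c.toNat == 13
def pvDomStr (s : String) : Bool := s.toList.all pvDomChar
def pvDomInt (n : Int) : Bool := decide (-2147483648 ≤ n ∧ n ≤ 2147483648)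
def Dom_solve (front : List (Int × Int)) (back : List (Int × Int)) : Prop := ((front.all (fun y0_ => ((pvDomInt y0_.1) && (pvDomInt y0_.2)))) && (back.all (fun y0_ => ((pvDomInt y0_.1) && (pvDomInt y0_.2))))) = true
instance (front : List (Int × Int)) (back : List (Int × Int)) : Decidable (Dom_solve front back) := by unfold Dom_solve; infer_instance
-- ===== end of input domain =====

-- B replaces A's single fused sweep with a clamped per-point bus-pool counter by two
-- independent per-point sorted sweeps tracking the maximum prefix deficit (objective: alternative).

-- ===== PORT A =====
-- Python sorts triples (time, etype, point) lexicographically: key = toLex (x.1, toLex x.2).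
-- The two-element list `points` is ported as a pair (points[0], points[1]); indexing
-- `points[point]` (point is always 0 or 1 here) becomes the branch on `point == 0`.
-- `astep` is the body of A's event loop, state ((points[0], points[1]), count).
def astep (st : (Int × Int) × Int) (ev : Int × Int × Int) : (Int × Int) × Int :=
  if ev.2.1 == 0 then  -- Arrival
    ((if ev.2.2 == 0 then (st.1.1 + 1, st.1.2) else (st.1.1, st.1.2 + 1)), st.2)
  else  -- Departure
    if ev.2.2 == 0 then
      if st.1.1 > 0 then ((st.1.1 - 1, st.1.2), st.2) else (st.1, st.2 + 1)
    else
      if st.1.2 > 0 then ((st.1.1, st.1.2 - 1), st.2) else (st.1, st.2 + 1)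

def solve (front : List (Int × Int)) (back : List (Int × Int)) : Int :=
  let events : List (Int × Int × Int) :=
    front.foldl (fun acc da => acc ++ [(da.1, (1:Int), (0:Int)), (da.2, (0:Int), (1:Int))]) []
  let events :=
    back.foldl (fun acc da => acc ++ [(da.1, (1:Int), (1:Int)), (da.2, (0:Int), (0:Int))]) events
  let events := PySem.List.sorted events (fun x => toLex (x.1, toLex x.2)) false
  (events.foldl astep (((0:Int), (0:Int)), (0:Int))).2

-- ===== PORT B =====
-- `bstep` is the body of B's per-point loop, state (running sum, best).
def bstep (sb : Int × Int) (ev : Int × Int) : Int × Int :=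
  let s := sb.1 + (if ev.2 == 1 then (1:Int) else -1)
  (s, if s > sb.2 then s else sb.2)

def unmatchedCount (deps : List Int) (arrs : List Int) : Int :=
  let events := PySem.List.sorted
    (deps.map (fun t => (t, (1:Int))) ++ arrs.map (fun t => (t, (0:Int))))
    (fun x => toLex x) false
  (events.foldl bstep ((0:Int), (0:Int))).2

def solve_alt (front : List (Int × Int)) (back : List (Int × Int)) : Int :=
  unmatchedCount (front.map (·.1)) (back.map (·.2)) +
    unmatchedCount (back.map (·.1)) (front.map (·.2))

-- ===== PRECONDITION & SPEC =====
def Spec_solve (front : List (Int × Int)) (back : List (Int × Int)) (out : Int) : Prop := out = solve_alt front back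
instance (front : List (Int × Int)) (back : List (Int × Int)) (out : Int) : Decidable (Spec_solve front back out) := by unfold Spec_solve; infer_instance

-- ===== CLAIM (what is proved, stated in full; the proofs are below) =====
def Claim_equal_solve : Prop := ∀ (front : List (Int × Int)) (back : List (Int × Int)), Dom_solve front back → Spec_solve front back (solve front back)

-- ===== LEMMAS AND PROOFS =====

-- A's sweep restricted to one point, on (time, etype) pairs: state (available, count).
def pstep (st : Int × Int) (ev : Int × Int) : Int × Int :=
  if ev.2 == 0 then (st.1 + 1, st.2)
  else if st.1 > 0 then (st.1 - 1, st.2) else (st.1, st.2 + 1)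

def drop3 (x : Int × Int × Int) : Int × Int := (x.1, x.2.1)

-- The count component of the per-point sweep is additive in its start value.
theorem pstep_count_shift (l : List (Int × Int)) :
    ∀ a c, l.foldl pstep (a, c) = ((l.foldl pstep (a, 0)).1, c + (l.foldl pstep (a, 0)).2) := by
  induction l with
  | nil => simp
  | cons e t ih =>
    intro a c
    simp only [List.foldl_cons, pstep]
    split_ifs with h1 h2
    · rw [ih (a + 1) c, ih (a + 1) 0]
    · rw [ih (a - 1) c, ih (a - 1) 0]
    · rw [ih a (c + 1), ih a (0 + 1)]
      simp only [Prod.mk.injEq]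
      exact ⟨trivial, by ring⟩

-- The fused sweep splits into two independent per-point sweeps.
theorem astep_split (l : List (Int × Int × Int))
    (hl : ∀ x ∈ l, x.2.2 = 0 ∨ x.2.2 = 1) :
    ∀ a b c, l.foldl astep ((a, b), c) =
      (((((l.filter (fun x => x.2.2 == 0)).map drop3).foldl pstep (a, 0)).1,
        (((l.filter (fun x => x.2.2 == 1)).map drop3).foldl pstep (b, 0)).1),
       c + (((l.filter (fun x => x.2.2 == 0)).map drop3).foldl pstep (a, 0)).2
         + (((l.filter (fun x => x.2.2 == 1)).map drop3).foldl pstep (b, 0)).2) := by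
  induction l with
  | nil => simp
  | cons x t ih =>
    intro a b c
    have hx := hl x (by simp)
    have ht : ∀ y ∈ t, y.2.2 = 0 ∨ y.2.2 = 1 := fun y hm => hl y (by simp [hm])
    rcases hx with hx | hx
    · have p0 : (x.2.2 == (0:Int)) = true := by simp [hx]
      have p1 : (x.2.2 == (1:Int)) = false := by simp [hx]
      simp only [List.foldl_cons, List.filter_cons, p0, p1, if_true, Bool.false_eq_true,
        if_false, List.map_cons, astep, pstep, drop3]
      by_cases he : (x.2.1 == (0:Int)) = true
      · simp only [he, if_true]
        exact ih ht (a + 1) b c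
      · rw [Bool.not_eq_true] at he
        simp only [he, Bool.false_eq_true, if_false]
        by_cases hp : a > 0
        · rw [if_pos hp, if_pos hp]
          exact ih ht (a - 1) b c
        · rw [if_neg hp, if_neg hp]
          rw [ih ht a b (c + 1), pstep_count_shift _ a (0 + 1)]
          simp only [Prod.mk.injEq]
          exact ⟨trivial, by ring⟩
    · have p0 : (x.2.2 == (0:Int)) = false := by simp [hx]
      have p1 : (x.2.2 == (1:Int)) = true := by simp [hx]
      simp only [List.foldl_cons, List.filter_cons, p0, p1, if_true, Bool.false_eq_true,
        if_false, List.map_cons, astep, pstep, drop3]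
      by_cases he : (x.2.1 == (0:Int)) = true
      · simp only [he, if_true]
        exact ih ht a (b + 1) c
      · rw [Bool.not_eq_true] at he
        simp only [he, Bool.false_eq_true, if_false]
        by_cases hp : b > 0
        · rw [if_pos hp, if_pos hp]
          exact ih ht a (b - 1) c
        · rw [if_neg hp, if_neg hp]
          rw [ih ht a b (c + 1), pstep_count_shift _ b (0 + 1)]
          simp only [Prod.mk.injEq]
          exact ⟨trivial, by ring⟩

-- A's clamped pool sweep relates to B's max-prefix sweep on the same event list.
theorem pstep_eq_bstep (l : List (Int × Int)) (hl : ∀ ev ∈ l, ev.2 = 0 ∨ ev.2 = 1) :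
    ∀ sum best, sum ≤ best →
      l.foldl pstep (best - sum, best) =
        (((l.foldl bstep (sum, best)).2 - (l.foldl bstep (sum, best)).1),
          (l.foldl bstep (sum, best)).2) ∧
      (l.foldl bstep (sum, best)).1 ≤ (l.foldl bstep (sum, best)).2 := by
  induction l with
  | nil => intro s b h; simpa using h
  | cons e t ih =>
    intro s b h
    have he := hl e (by simp)
    have ht : ∀ ev ∈ t, ev.2 = 0 ∨ ev.2 = 1 := fun ev hm => hl ev (by simp [hm])
    rcases he with he | he
    · have e0 : (e.2 == (0:Int)) = true := by simp [he]
      have e1 : (e.2 == (1:Int)) = false := by simp [he]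
      simp only [List.foldl_cons, pstep, bstep, e0, e1, if_true, Bool.false_eq_true, if_false]
      rw [if_neg (by omega : ¬ (s + (-1:Int) > b))]
      have h1 : b - s + 1 = b - (s + -1) := by ring
      rw [h1]
      exact ih ht (s + -1) b (by omega)
    · have e0 : (e.2 == (0:Int)) = false := by simp [he]
      have e1 : (e.2 == (1:Int)) = true := by simp [he]
      simp only [List.foldl_cons, pstep, bstep, e0, e1, if_true, Bool.false_eq_true, if_false]
      by_cases hpos : b - s > 0
      · rw [if_pos hpos, if_neg (by omega : ¬ (s + (1:Int) > b))]
        have h1 : b - s - 1 = b - (s + 1) := by ring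
        rw [h1]
        exact ih ht (s + 1) b (by omega)
      · have hs : s = b := by omega
        subst hs
        rw [if_neg hpos, if_pos (by omega : s + (1:Int) > s)]
        have h1 : s - s = (s + 1) - (s + 1) := by ring
        rw [h1]
        exact ih ht (s + 1) (s + 1) le_rfl

-- Filtering one point out of the lexicographically sorted event list and dropping
-- the point component is sorting that point's own (time, etype) list.
theorem sorted_filter_point (ev : List (Int × Int × Int)) (p : Int) :
    ((PySem.List.sorted ev (fun x => toLex (x.1, toLex x.2)) false).filter
        (fun x => x.2.2 == p)).map drop3
      = PySem.List.sorted ((ev.filter (fun x => x.2.2 == p)).map drop3)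
          (fun x => toLex x) false := by
  apply PySem.List.eq_of_perm_of_pairwise_le_of_injective (fun x : Int × Int => toLex x)
    (fun a b h => by simpa using h)
  · exact (((PySem.List.sorted_perm ev _ false).filter _).map drop3).trans
      ((PySem.List.sorted_perm _ _ false).symm)
  · rw [List.pairwise_map]
    have hp := (PySem.List.sorted_pairwise ev (fun x => toLex (x.1, toLex x.2))).filter
      (fun x => x.2.2 == p)
    refine hp.imp_of_mem ?_
    intro a b ha hb hle
    have ha' : a.2.2 = p := by simpa using (List.of_mem_filter ha)
    have hb' : b.2.2 = p := by simpa using (List.of_mem_filter hb)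
    rw [Prod.Lex.toLex_le_toLex] at hle ⊢
    rcases hle with h | ⟨h1, h2⟩
    · exact Or.inl h
    · refine Or.inr ⟨h1, ?_⟩
      rw [Prod.Lex.toLex_le_toLex] at h2
      rcases h2 with h | ⟨h3, _⟩
      · exact le_of_lt h
      · exact le_of_eq h3
  · exact PySem.List.sorted_pairwise _ _

-- The point-0 slice of the raw event list is front's departures then back's arrivals.
theorem filt_map_zero (front back : List (Int × Int)) :
    (((front.flatMap (fun da => [(da.1, (1:Int), (0:Int)), (da.2, (0:Int), (1:Int))]) ++
        back.flatMap (fun da => [(da.1, (1:Int), (1:Int)), (da.2, (0:Int), (0:Int))])).filter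
          (fun x => x.2.2 == (0:Int))).map drop3)
      = (front.map (fun x => x.1)).map (fun t => (t, (1:Int))) ++
          (back.map (fun x => x.2)).map (fun t => (t, (0:Int))) := by
  simp only [List.filter_append, List.map_append, List.map_map]
  refine congrArg₂ (· ++ ·) ?_ ?_
  · induction front with
    | nil => simp
    | cons d t ih => simp [List.flatMap_cons, ih, drop3, Function.comp]
  · induction back with
    | nil => simp
    | cons d t ih => simp [List.flatMap_cons, ih, drop3, Function.comp]

-- The point-1 slice is front's arrivals then back's departures.
theorem filt_map_one (front back : List (Int × Int)) :
    (((front.flatMap (fun da => [(da.1, (1:Int), (0:Int)), (da.2, (0:Int), (1:Int))]) ++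
        back.flatMap (fun da => [(da.1, (1:Int), (1:Int)), (da.2, (0:Int), (0:Int))])).filter
          (fun x => x.2.2 == (1:Int))).map drop3)
      = (front.map (fun x => x.2)).map (fun t => (t, (0:Int))) ++
          (back.map (fun x => x.1)).map (fun t => (t, (1:Int))) := by
  simp only [List.filter_append, List.map_append, List.map_map]
  refine congrArg₂ (· ++ ·) ?_ ?_
  · induction front with
    | nil => simp
    | cons d t ih => simp [List.flatMap_cons, ih, drop3, Function.comp]
  · induction back with
    | nil => simp
    | cons d t ih => simp [List.flatMap_cons, ih, drop3, Function.comp]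

-- Every tag in a deps/arrs pair list is 0 or 1.
theorem tags01 (xs ys : List Int) :
    ∀ ev ∈ PySem.List.sorted (xs.map (fun t => (t, (1:Int))) ++ ys.map (fun t => (t, (0:Int))))
        (fun x : Int × Int => toLex x) false, ev.2 = 0 ∨ ev.2 = 1 := by
  intro ev hm
  rw [PySem.List.mem_sorted] at hm
  rcases List.mem_append.1 hm with h | h <;> rcases List.mem_map.1 h with ⟨t, _, rfl⟩
  · exact Or.inr rfl
  · exact Or.inl rfl

-- B's per-point routine computes the per-point count of A's sweep on the sorted pair list.
theorem unmatchedCount_eq (deps arrs : List Int) :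
    unmatchedCount deps arrs =
      ((PySem.List.sorted (deps.map (fun t => (t, (1:Int))) ++ arrs.map (fun t => (t, (0:Int))))
          (fun x : Int × Int => toLex x) false).foldl pstep ((0:Int), (0:Int))).2 := by
  unfold unmatchedCount
  obtain ⟨h, -⟩ := pstep_eq_bstep _ (tags01 deps arrs) 0 0 le_rfl
  norm_num at h
  rw [h]

-- ===== VERDICT (by name: the statement is the Claim_ definition above) =====
theorem solve_spec : Claim_equal_solve := by
  unfold Claim_equal_solve Spec_solve
  intro front back _
  unfold solve solve_alt
  simp only [PySem.List.foldl_append_eq_flatMap, List.nil_append]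
  have hl : ∀ x ∈ PySem.List.sorted
      (front.flatMap (fun da => [(da.1, (1:Int), (0:Int)), (da.2, (0:Int), (1:Int))]) ++
        back.flatMap (fun da => [(da.1, (1:Int), (1:Int)), (da.2, (0:Int), (0:Int))]))
      (fun x => toLex (x.1, toLex x.2)) false, x.2.2 = 0 ∨ x.2.2 = 1 := by
    intro x hm
    rw [PySem.List.mem_sorted] at hm
    rcases List.mem_append.1 hm with h | h <;>
      rcases List.mem_flatMap.1 h with ⟨da, -, hx⟩ <;>
      simp only [List.mem_cons, List.not_mem_nil, or_false] at hx <;>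
      rcases hx with rfl | rfl <;> simp
  rw [astep_split _ hl 0 0 0, sorted_filter_point, sorted_filter_point,
    filt_map_zero, filt_map_one]
  rw [unmatchedCount_eq, unmatchedCount_eq]
  rw [PySem.List.sorted_eq_sorted_of_perm
    ((front.map (fun x => x.2)).map (fun t => (t, (0:Int))) ++
      (back.map (fun x => x.1)).map (fun t => (t, (1:Int))))
    ((back.map (fun x => x.1)).map (fun t => (t, (1:Int))) ++
      (front.map (fun x => x.2)).map (fun t => (t, (0:Int))))
    (fun x : Int × Int => toLex x) (fun a b h => by simpa using h)
    List.perm_append_comm]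
  dsimp only
  ring
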